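-- pv_equiv track=rewrite | github.com/FNA2003/grupo1-tp1-v1 | lexer/AFDs.py | afd_id
-- ===== SOURCE A (Python) =====
-- def afd_id(cadena):
--     """El estado aceptado es 1"""
--     estados_sin_trampa = [0, 1]
--     estados_aceptados = [1]
--     estados_no_aceptados = [0]
--     estado_trampa = 't'
--     estado = 0
--     caracteres = ['a', 'b', 'c', 'd', 'e', 'f', 'g', 'h', 'i', 'j', 'k', 'l', 'm', 'n', 'o', 'p', 'q', 'r',
--                 's', 't', 'u', 'v', 'w', 'x', 'y', 'z', 'A', 'B', 'C', 'D', 'E', 'F', 'G', 'H', 'I', 'J', 'K',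
--                 'L', 'M', 'N', 'O', 'P', 'Q', 'R', 'S', 'T', 'U', 'V', 'W', 'X', 'Y', 'Z', '0', '1', '2', '3',
--                 '4', '5', '6', '7', '8', '9']
--     delta = {
--     0: {'a': 1, 'b': 1, 'c': 1, 'd': 1, 'e': 1, 'f': 1, 'g': 1, 'h': 1, 'i': 1, 'j': 1, 'k': 1, 'l': 1, 'm': 1,
--         'n': 1, 'o': 1, 'p': 1, 'q': 1, 'r': 1, 's': 1, 't': 1, 'u': 1, 'v': 1, 'w': 1, 'x': 1, 'y': 1, 'z': 1,
--         'A': 't', 'B': 't', 'C': 't', 'D': 't', 'E': 't', 'F': 't', 'G': 't', 'H': 't', 'I': 't', 'J': 't', 'K': 't',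
--         'L': 't', 'M': 't', 'N': 't', 'O': 't', 'P': 't', 'Q': 't', 'R': 't', 'S': 't', 'T': 't', 'U': 't', 'V': 't',
--         'W': 't', 'X': 't', 'Y': 't', 'Z': 't', '0': 't', '1': 't', '2': 't', '3': 't', '4': 't', '5': 't', '6': 't',
--         '7': 't', '8': 't', '9': 't'},
--     1: {'a': 1, 'b': 1, 'c': 1, 'd': 1, 'e': 1, 'f': 1, 'g': 1, 'h': 1, 'i': 1, 'j': 1, 'k': 1, 'l': 1, 'm': 1,
--         'n': 1, 'o': 1, 'p': 1, 'q': 1, 'r': 1, 's': 1, 't': 1, 'u': 1, 'v': 1, 'w': 1, 'x': 1, 'y': 1, 'z': 1,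
--         'A': 1, 'B': 1, 'C': 1, 'D': 1, 'E': 1, 'F': 1, 'G': 1, 'H': 1, 'I': 1, 'J': 1, 'K': 1, 'L': 1, 'M': 1,
--         'N': 1, 'O': 1, 'P': 1, 'Q': 1, 'R': 1, 'S': 1, 'T': 1, 'U': 1, 'V': 1, 'W': 1, 'X': 1, 'Y': 1, 'Z': 1,
--         '0': 1, '1': 1, '2': 1, '3': 1, '4': 1, '5': 1, '6': 1, '7': 1, '8': 1, '9': 1},
--     't': {'a': 't', 'b': 't', 'c': 't', 'd': 't', 'e': 't', 'f': 't', 'g': 't', 'h': 't', 'i': 't', 'j': 't', 'k': 't',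
--         'l': 't', 'm': 't', 'n': 't', 'o': 't', 'p': 't', 'q': 't', 'r': 't', 's': 't', 't': 't', 'u': 't', 'v': 't',
--         'w': 't', 'x': 't', 'y': 't', 'z': 't', 'A': 't', 'B': 't', 'C': 't', 'D': 't', 'E': 't', 'F': 't', 'G': 't',
--         'H': 't', 'I': 't', 'J': 't', 'K': 't', 'L': 't', 'M': 't', 'N': 't', 'O': 't', 'P': 't', 'Q': 't', 'R': 't',
--         'S': 't', 'T': 't', 'U': 't', 'V': 't', 'W': 't', 'X': 't', 'Y': 't', 'Z': 't', '0': 't', '1': 't', '2': 't',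
--         '3': 't', '4': 't', '5': 't', '6': 't', '7': 't', '8': 't', '9': 't'}
--     }
--
--     for caracter in cadena:
--         if (estado in estados_sin_trampa) and (caracter in caracteres):
--             estado = delta[estado][caracter]
--         elif (estado == 't') or not(caracter in caracteres):
--             estado = 't'
--             break
--
--     if estado in estados_aceptados:
--         estado_final = 'aceptado'
--     elif estado in estados_no_aceptados:
--         estado_final = 'no aceptado'
--     elif estado == estado_trampa:
--         estado_final = 'trampa'
--
--     return estado_final
-- ===== SOURCE B (Python) =====
-- def afd_id(cadena):
--     if not cadena:
--         return 'no aceptado'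
--     if not ('a' <= cadena[0] <= 'z'):
--         return 'trampa'
--     for caracter in cadena:
--         if not ('a' <= caracter <= 'z' or 'A' <= caracter <= 'Z' or '0' <= caracter <= '9'):
--             return 'trampa'
--     return 'aceptado'
-- ===== Notes on version B (the rewrite author's own statement) =====
-- stated objective: simpler
-- what changed: Replaces the 3-state DFA simulation with its 180-entry transition dict by a direct predicate: empty input rejected, accepted iff the first character is a lowercase letter and every character is an ASCII alphanumeric, trap otherwise, keeping the same three result strings.
import Mathlib
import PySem

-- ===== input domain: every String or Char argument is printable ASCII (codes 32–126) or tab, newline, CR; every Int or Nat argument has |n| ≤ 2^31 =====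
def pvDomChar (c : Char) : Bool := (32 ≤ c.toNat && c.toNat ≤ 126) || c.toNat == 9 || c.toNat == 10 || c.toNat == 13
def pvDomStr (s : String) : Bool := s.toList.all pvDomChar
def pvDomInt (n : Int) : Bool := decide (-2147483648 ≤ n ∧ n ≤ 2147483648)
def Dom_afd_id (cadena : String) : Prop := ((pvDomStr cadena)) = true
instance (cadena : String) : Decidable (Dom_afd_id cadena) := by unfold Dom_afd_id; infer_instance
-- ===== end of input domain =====

-- B replaces A's 3-state DFA simulation (180-entry transition dict) by a direct predicate
-- on the first character and the characters of the string; objective: simpler.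

-- ===== PORT A =====
inductive St | s0 | s1 | st
deriving DecidableEq, Repr

-- A's list `caracteres` (the 62 ASCII alphanumerics), verbatim
def caracteres : List Char :=
  ['a','b','c','d','e','f','g','h','i','j','k','l','m','n','o','p','q','r',
   's','t','u','v','w','x','y','z','A','B','C','D','E','F','G','H','I','J','K',
   'L','M','N','O','P','Q','R','S','T','U','V','W','X','Y','Z','0','1','2','3',
   '4','5','6','7','8','9']

-- the lowercase keys of delta[0] that map to 1 (delta[0] maps them to 1, all others to 't')
def minusculas : List Char :=
  ['a','b','c','d','e','f','g','h','i','j','k','l','m','n','o','p','q','r',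
   's','t','u','v','w','x','y','z']

-- A's dict `delta`, as a function; exact on the 62 chars of `caracteres`
-- (A only consults delta when the character is in `caracteres`)
def deltaA : St → Char → St
  | St.s0, c => if c ∈ minusculas then St.s1 else St.st
  | St.s1, _ => St.s1
  | St.st, _ => St.st

-- A's for-loop over `cadena`, with the `break` as stopping with state 't'
def loopA : St → List Char → St
  | e, [] => e
  | e, c :: rest =>
    if (e = St.s0 ∨ e = St.s1) ∧ c ∈ caracteres then loopA (deltaA e c) rest
    else if e = St.st ∨ c ∉ caracteres then St.st
    else loopA e rest

def afd_id (cadena : String) : String :=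
  match loopA St.s0 cadena.toList with
  | St.s1 => "aceptado"      -- estado in estados_aceptados
  | St.s0 => "no aceptado"   -- estado in estados_no_aceptados
  | St.st => "trampa"        -- estado == estado_trampa

-- ===== PORT B =====
def esAlnum (c : Char) : Bool :=
  ('a' ≤ c && c ≤ 'z') || ('A' ≤ c && c ≤ 'Z') || ('0' ≤ c && c ≤ '9')

-- B's for-loop: first non-alphanumeric char returns 'trampa', else 'aceptado'
def checkAll : List Char → String
  | [] => "aceptado"
  | c :: rest => if esAlnum c then checkAll rest else "trampa"

def afd_id_alt (cadena : String) : String :=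
  match cadena.toList with
  | [] => "no aceptado"
  | c :: _ => if 'a' ≤ c && c ≤ 'z' then checkAll cadena.toList else "trampa"

-- ===== PRECONDITION & SPEC =====
def Spec_afd_id (cadena : String) (out : String) : Prop := out = afd_id_alt cadena
instance (cadena : String) (out : String) : Decidable (Spec_afd_id cadena out) := by unfold Spec_afd_id; infer_instance

-- ===== CLAIM (what is proved, stated in full; the proofs are below) =====
def Claim_equal_afd_id : Prop := ∀ (cadena : String), Dom_afd_id cadena → Spec_afd_id cadena (afd_id cadena)

-- ===== LEMMAS AND PROOFS =====
theorem mem_minusculas (c : Char) : c ∈ minusculas ↔ ('a' ≤ c && c ≤ 'z') = true := by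
  constructor
  · intro h; fin_cases h <;> decide
  · intro h
    simp only [Bool.and_eq_true, decide_eq_true_eq] at h
    have n1 : 97 ≤ c.toNat := h.1
    have n2 : c.toNat ≤ 122 := h.2
    interval_cases h : c.toNat <;>
      (rw [show c = Char.ofNat c.toNat from (Char.ofNat_toNat c).symm, h]; decide)

theorem mem_caracteres (c : Char) : c ∈ caracteres ↔ esAlnum c = true := by
  constructor
  · intro h; fin_cases h <;> decide
  · intro h
    simp only [esAlnum, Bool.or_eq_true, Bool.and_eq_true, decide_eq_true_eq] at h
    rcases h with (⟨h1, h2⟩ | ⟨h1, h2⟩) | ⟨h1, h2⟩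
    · have n1 : 97 ≤ c.toNat := h1
      have n2 : c.toNat ≤ 122 := h2
      interval_cases h : c.toNat <;>
        (rw [show c = Char.ofNat c.toNat from (Char.ofNat_toNat c).symm, h]; decide)
    · have n1 : 65 ≤ c.toNat := h1
      have n2 : c.toNat ≤ 90 := h2
      interval_cases h : c.toNat <;>
        (rw [show c = Char.ofNat c.toNat from (Char.ofNat_toNat c).symm, h]; decide)
    · have n1 : 48 ≤ c.toNat := h1
      have n2 : c.toNat ≤ 57 := h2
      interval_cases h : c.toNat <;>
        (rw [show c = Char.ofNat c.toNat from (Char.ofNat_toNat c).symm, h]; decide)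

theorem loopA_st (l : List Char) : loopA St.st l = St.st := by
  cases l <;> simp [loopA]

theorem loopA_s1 (l : List Char) :
    loopA St.s1 l = (if l.all esAlnum then St.s1 else St.st) := by
  induction l with
  | nil => simp [loopA]
  | cons c rest ih =>
    by_cases hc : esAlnum c = true
    · have hm : c ∈ caracteres := (mem_caracteres c).mpr hc
      simp [loopA, hm, deltaA, ih, hc]
    · have hm : c ∉ caracteres := fun h => hc ((mem_caracteres c).mp h)
      simp [loopA, hm, List.all_cons, hc]

theorem checkAll_eq (l : List Char) :
    checkAll l = (if l.all esAlnum then "aceptado" else "trampa") := by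
  induction l with
  | nil => simp [checkAll]
  | cons c rest ih =>
    by_cases hc : esAlnum c = true <;> simp [checkAll, hc, ih]

-- ===== VERDICT (by name: the statement is the Claim_ definition above) =====
theorem afd_id_spec : Claim_equal_afd_id := by
  intro cadena _
  unfold Spec_afd_id afd_id afd_id_alt
  cases h : cadena.toList with
  | nil => simp [loopA]
  | cons c rest =>
    by_cases hlow : ('a' ≤ c && c ≤ 'z') = true
    · have hmin : c ∈ minusculas := (mem_minusculas c).mpr hlow
      have halnum : esAlnum c = true := by simp [esAlnum, hlow]
      have hmem : c ∈ caracteres := (mem_caracteres c).mpr halnum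
      have h0 : loopA St.s0 (c :: rest) = loopA St.s1 rest := by
        simp [loopA, hmem, hmin, deltaA]
      rw [h0, loopA_s1, checkAll_eq]
      simp only [hlow, if_true, List.all_cons, halnum, Bool.true_and]
      by_cases hall : rest.all esAlnum = true <;> simp [hall]
    · by_cases halnum : esAlnum c = true
      · have hmin : c ∉ minusculas := fun hm => hlow ((mem_minusculas c).mp hm)
        have hmem : c ∈ caracteres := (mem_caracteres c).mpr halnum
        have h0 : loopA St.s0 (c :: rest) = St.st := by
          simp [loopA, hmem, hmin, deltaA, loopA_st]
        rw [h0]; simp [hlow]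
      · have hmem : c ∉ caracteres := fun hm => halnum ((mem_caracteres c).mp hm)
        simp [loopA, hmem, hlow]
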